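-- pv_equiv track=rewrite | github.com/jakapongh/iccs101 | homework/hw_06/passwd.py | has_repeating_chars
-- ===== SOURCE A (Python) =====
-- ENGLISH_ALPHABET = "abcdefghijklmnopqrstuvwxyz"
--
-- NUMERICAL_DIGITS = "1234567890"
--
-- def has_repeating_chars(string):
--     # no character or digit can appear three
--     # times in a row
--     chars_list = {}
--     for char in string:
--         normalised_char = char.lower()
--
--         # Skip non alphabet characters
--         if normalised_char not in ENGLISH_ALPHABET \
--            and char not in NUMERICAL_DIGITS:
--             continue
--
--         if normalised_char not in chars_list.keys():
--             chars_list[normalised_char] = 1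
--         else:
--             chars_list[normalised_char] += 1
--
--         if chars_list[normalised_char] > 2:
--             return True
--
--     return False
-- ===== SOURCE B (Python) =====
-- ENGLISH_ALPHABET = "abcdefghijklmnopqrstuvwxyz"
--
-- NUMERICAL_DIGITS = "1234567890"
--
-- def has_repeating_chars(string):
--     # Normalise once, then iterate over the FIXED 36-symbol alphabet and ask,
--     # for each symbol, how often it occurs in the normalised text (list.count).
--     # No dictionary and no per-input-character counting state at all.
--     normalised = [c.lower() for c in string
--                   if c.lower() in ENGLISH_ALPHABET or c in NUMERICAL_DIGITS]
--     return any(normalised.count(symbol) > 2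
--                for symbol in ENGLISH_ALPHABET + NUMERICAL_DIGITS)
-- ===== Notes on version B (the rewrite author's own statement) =====
-- stated objective: alternative
-- what changed: Instead of streaming over the input with a mutable count dictionary and an early return, B iterates over the fixed 36-symbol alphabet and tests each symbol's total occurrence count in the normalised text with list.count; no dictionary or running state exists.
import Mathlib
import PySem

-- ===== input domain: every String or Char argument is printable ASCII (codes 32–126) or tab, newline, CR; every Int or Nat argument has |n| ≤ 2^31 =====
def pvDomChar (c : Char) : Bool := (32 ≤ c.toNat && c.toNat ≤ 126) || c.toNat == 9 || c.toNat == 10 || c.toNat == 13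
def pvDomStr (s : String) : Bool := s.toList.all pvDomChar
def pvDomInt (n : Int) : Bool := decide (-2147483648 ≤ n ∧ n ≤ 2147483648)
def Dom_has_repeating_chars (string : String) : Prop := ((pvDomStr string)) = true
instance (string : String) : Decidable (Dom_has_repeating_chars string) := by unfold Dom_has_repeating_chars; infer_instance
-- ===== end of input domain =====

-- B replaces A's streaming count-dictionary-with-early-return by iterating over the FIXED
-- 36-symbol alphabet and testing each symbol's total occurrence count (list.count) in the
-- normalised text; no dictionary or running state. Same asymptotic cost ("alternative").

-- ===== PORT A =====
def ENGLISH_ALPHABET : String := "abcdefghijklmnopqrstuvwxyz"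

def NUMERICAL_DIGITS : String := "1234567890"

-- A's loop over the string, carrying the dict and returning early when a count exceeds 2
def hrcLoop : List Char → PySem.Dict Char Int → Bool
  | [], _ => false
  | char :: rest, chars_list =>
    let normalised_char := PySem.Chars.lowerChar char
    if !(ENGLISH_ALPHABET.toList.contains normalised_char)
       && !(NUMERICAL_DIGITS.toList.contains char) then
      hrcLoop rest chars_list
    else
      let chars_list' :=
        if !(chars_list.contains normalised_char) then
          chars_list.insert normalised_char 1
        else
          chars_list.insert normalised_char (chars_list.getD normalised_char 0 + 1)
      if chars_list'.getD normalised_char 0 > 2 then true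
      else hrcLoop rest chars_list'

def has_repeating_chars (string : String) : Bool :=
  hrcLoop string.toList PySem.Dict.empty

-- ===== PORT B =====
def has_repeating_chars_alt (string : String) : Bool :=
  let normalised := (string.toList.filter (fun c =>
      ENGLISH_ALPHABET.toList.contains (PySem.Chars.lowerChar c)
      || NUMERICAL_DIGITS.toList.contains c)).map PySem.Chars.lowerChar
  (ENGLISH_ALPHABET ++ NUMERICAL_DIGITS).toList.any
    (fun symbol => PySem.List.count normalised symbol > 2)

-- ===== PRECONDITION & SPEC =====
def Spec_has_repeating_chars (string : String) (out : Bool) : Prop := out = has_repeating_chars_alt string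
instance (string : String) (out : Bool) : Decidable (Spec_has_repeating_chars string out) := by unfold Spec_has_repeating_chars; infer_instance

-- ===== CLAIM (what is proved, stated in full; the proofs are below) =====
def Claim_equal_has_repeating_chars : Prop := ∀ (string : String), Dom_has_repeating_chars string → Spec_has_repeating_chars string (has_repeating_chars string)

-- ===== LEMMAS AND PROOFS =====

-- the filter/normalise step both programs share
def hrcKeep (c : Char) : Bool :=
  ENGLISH_ALPHABET.toList.contains (PySem.Chars.lowerChar c)
  || NUMERICAL_DIGITS.toList.contains c

def hrcFiltered (l : List Char) : List Char :=
  (l.filter hrcKeep).map PySem.Chars.lowerChar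

-- A's loop: true iff some character's running count would exceed 2
theorem hrcLoop_spec (l : List Char) (d : PySem.Dict Char Int)
    (h : ∀ v, 0 ≤ d.getD v 0 ∧ d.getD v 0 ≤ 2) :
    hrcLoop l d = true ↔ ∃ v, d.getD v 0 + ((hrcFiltered l).count v : Int) > 2 := by
  induction l generalizing d with
  | nil =>
    simp [hrcLoop, hrcFiltered]
    intro v
    exact (h v).2
  | cons c rest ih =>
    by_cases hk : hrcKeep c = true
    · have hfil : hrcFiltered (c :: rest) = PySem.Chars.lowerChar c :: hrcFiltered rest := by
        simp [hrcFiltered, List.filter, hk]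
      set n := PySem.Chars.lowerChar c with hn
      have hd' : (if !(d.contains n) then d.insert n 1
           else d.insert n (d.getD n 0 + 1)) = d.insert n (d.getD n 0 + 1) := by
        by_cases hc : d.contains n = true
        · simp [hc]
        · have hc' : d.contains n = false := by simpa using hc
          have h0 : d.getD n 0 = 0 := PySem.Dict.getD_of_not_contains d 0 hc'
          rw [h0]; simp [hc']
      have hk' : (!(ENGLISH_ALPHABET.toList.contains n)
          && !(NUMERICAL_DIGITS.toList.contains c)) = false := by
        simp only [hrcKeep, hn] at hk ⊢
        cases hA : ENGLISH_ALPHABET.toList.contains (PySem.Chars.lowerChar c) <;>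
          cases hB : NUMERICAL_DIGITS.toList.contains c <;> simp_all
      have hstep : hrcLoop (c :: rest) d =
          (if (d.insert n (d.getD n 0 + 1)).getD n 0 > 2 then true
           else hrcLoop rest (d.insert n (d.getD n 0 + 1))) := by
        rw [hrcLoop]
        simp only [← hn, hk', Bool.false_eq_true, if_false, hd']
      have hins : ∀ v, (d.insert n (d.getD n 0 + 1)).getD v 0
          = if v = n then d.getD n 0 + 1 else d.getD v 0 := by
        intro v; exact PySem.Dict.getD_insert d n v (d.getD n 0 + 1) 0
      rw [hstep, hfil]
      have hcount : ∀ v, (((n :: hrcFiltered rest).count v : Int))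
          = (if v = n then 1 else 0) + ((hrcFiltered rest).count v : Int) := by
        intro v
        by_cases hv : v = n
        · subst hv; simp; ring
        · have hne : ¬ n = v := fun hh => hv hh.symm
          simp [hne, hv]
      have hn3 : (d.insert n (d.getD n 0 + 1)).getD n 0 = d.getD n 0 + 1 := by
        rw [hins n]; simp
      by_cases hbig : (d.insert n (d.getD n 0 + 1)).getD n 0 > 2
      · rw [if_pos hbig]
        rw [hn3] at hbig
        constructor
        · intro _
          refine ⟨n, ?_⟩
          rw [hcount n, if_pos rfl]
          have hnn : (0:Int) ≤ ((hrcFiltered rest).count n : Int) := Int.natCast_nonneg _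
          omega
        · intro _; rfl
      · rw [if_neg hbig]
        rw [hn3] at hbig
        have hinv : ∀ v, 0 ≤ (d.insert n (d.getD n 0 + 1)).getD v 0 ∧
            (d.insert n (d.getD n 0 + 1)).getD v 0 ≤ 2 := by
          intro v
          rw [hins v]
          split_ifs with hv
          · have := (h n).1; omega
          · exact h v
        rw [ih _ hinv]
        constructor
        · rintro ⟨v, hv⟩
          rw [hins v] at hv
          refine ⟨v, ?_⟩
          rw [hcount v]
          by_cases hvn : v = n
          · subst hvn
            simp at hv ⊢
            omega
          · simp only [if_neg hvn] at hv ⊢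
            omega
        · rintro ⟨v, hv⟩
          rw [hcount v] at hv
          refine ⟨v, ?_⟩
          rw [hins v]
          by_cases hvn : v = n
          · subst hvn
            simp at hv ⊢
            omega
          · simp only [if_neg hvn] at hv ⊢
            omega
    · have hfil : hrcFiltered (c :: rest) = hrcFiltered rest := by
        simp [hrcFiltered, List.filter, hk]
      have hk' : (!(ENGLISH_ALPHABET.toList.contains (PySem.Chars.lowerChar c))
          && !(NUMERICAL_DIGITS.toList.contains c)) = true := by
        simp only [hrcKeep] at hk
        cases hA : ENGLISH_ALPHABET.toList.contains (PySem.Chars.lowerChar c) <;>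
          cases hB : NUMERICAL_DIGITS.toList.contains c <;> simp_all
      rw [hfil]
      simp only [hrcLoop, hk', if_pos]
      exact ih d h

-- every character of the filtered/normalised text belongs to the fixed 36-symbol alphabet
theorem mem_filtered_mem_alphabet (l : List Char) (v : Char)
    (hv : v ∈ hrcFiltered l) : v ∈ (ENGLISH_ALPHABET ++ NUMERICAL_DIGITS).toList := by
  simp only [hrcFiltered, List.mem_map, List.mem_filter] at hv
  obtain ⟨c, ⟨_, hk⟩, hc⟩ := hv
  simp only [hrcKeep, Bool.or_eq_true, List.contains_eq_mem, decide_eq_true_eq] at hk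
  have happ : (ENGLISH_ALPHABET ++ NUMERICAL_DIGITS).toList
      = ENGLISH_ALPHABET.toList ++ NUMERICAL_DIGITS.toList := String.toList_append
  rw [happ, List.mem_append]
  rcases hk with hA | hB
  · exact Or.inl (hc ▸ hA)
  · right
    have hB' := hB
    have hlist : NUMERICAL_DIGITS.toList = ['1','2','3','4','5','6','7','8','9','0'] := by decide
    rw [hlist] at hB'
    simp only [List.mem_cons, List.not_mem_nil, or_false] at hB'
    have hfix : PySem.Chars.lowerChar c = c := by
      rcases hB' with h|h|h|h|h|h|h|h|h|h <;> subst h <;> decide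
    rw [← hc, hfix]
    exact hB

-- B: true iff some character has total count > 2 in the filtered text
theorem alt_spec (string : String) :
    has_repeating_chars_alt string = true ↔
      ∃ v, ((hrcFiltered string.toList).count v : Int) > 2 := by
  unfold has_repeating_chars_alt
  simp only [List.any_eq_true, PySem.List.count_eq]
  constructor
  · rintro ⟨s, _, hs⟩
    refine ⟨s, ?_⟩
    simp only [gt_iff_lt, decide_eq_true_eq] at hs
    have : (hrcFiltered string.toList).count s
        = ((string.toList.filter hrcKeep).map PySem.Chars.lowerChar).count s := rfl
    rw [this]
    exact_mod_cast hs
  · rintro ⟨v, hv⟩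
    have hcnt : ((string.toList.filter (fun c =>
        ENGLISH_ALPHABET.toList.contains (PySem.Chars.lowerChar c)
        || NUMERICAL_DIGITS.toList.contains c)).map PySem.Chars.lowerChar).count v
        = (hrcFiltered string.toList).count v := rfl
    refine ⟨v, ?_, ?_⟩
    · apply mem_filtered_mem_alphabet string.toList
      by_contra hnot
      rw [List.count_eq_zero_of_not_mem hnot] at hv
      omega
    · simp only [gt_iff_lt, decide_eq_true_eq, hcnt]
      omega

-- ===== VERDICT (by name: the statement is the Claim_ definition above) =====
theorem has_repeating_chars_spec : Claim_equal_has_repeating_chars := by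
  intro string _
  unfold Spec_has_repeating_chars has_repeating_chars
  have hA := hrcLoop_spec string.toList PySem.Dict.empty
    (by intro v; simp [PySem.Dict.getD_empty])
  have hB := alt_spec string
  simp only [PySem.Dict.getD_empty, zero_add] at hA
  by_cases h : ∃ v, ((hrcFiltered string.toList).count v : Int) > 2
  · rw [hA.mpr h, (hB.mpr h)]
  · have h1 : hrcLoop string.toList PySem.Dict.empty ≠ true := fun hc => h (hA.mp hc)
    have h2 : has_repeating_chars_alt string ≠ true := fun hc => h (hB.mp hc)
    simp only [Bool.not_eq_true] at h1 h2
    rw [h1, h2]
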